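-- pv_equiv track=rewrite | github.com/LucasMagnum/coding-challenges | python/daily_interview_pro/202004/07.py | solution
-- ===== SOURCE A (Python) =====
-- def solution(array):
--     bonus = [1] * len(array)
--
--     for i in range(1, len(array)):
--         if array[i - 1] < array[i]:
--             bonus[i] = bonus[i - 1] + 1
--
--     for i in range(len(bonus) - 2, -1, -1):
--         if array[i + 1] < array[i]:
--             bonus[i] = max(bonus[i], bonus[i + 1] + 1)
--
--     return bonus
-- ===== SOURCE B (Python) =====
-- def solution(array):
--     # single forward pass over maximal strictly-descending segments:
--     # each segment start gets max(ascending value, segment length), the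
--     # rest of the segment gets d-1, ..., 1; no second pass, no reversal.
--     n = len(array)
--     res = []
--     i = 0
--     while i < n:
--         j = i
--         while j + 1 < n and array[j + 1] < array[j]:
--             j += 1
--         d = j - i + 1  # length of the descending run starting at i
--         if i > 0 and array[i - 1] < array[i]:
--             inc = res[-1] + 1
--         else:
--             inc = 1
--         res.append(max(inc, d))
--         for t in range(1, d):
--             res.append(d - t)
--         i = j + 1
--     return res
-- ===== Notes on version B (the rewrite author's own statement) =====
-- stated objective: alternative
-- what changed: A allocates a full bonus array and mutates it with two whole-array index passes (forward ascent pass, then backward descent pass with max); B is a single forward pass that jumps over maximal strictly-descending segments, appending each segment's values at once (max(ascending value, segment length) at the segment head, then d-1..1), with no backward pass and no second array.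
import Mathlib
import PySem

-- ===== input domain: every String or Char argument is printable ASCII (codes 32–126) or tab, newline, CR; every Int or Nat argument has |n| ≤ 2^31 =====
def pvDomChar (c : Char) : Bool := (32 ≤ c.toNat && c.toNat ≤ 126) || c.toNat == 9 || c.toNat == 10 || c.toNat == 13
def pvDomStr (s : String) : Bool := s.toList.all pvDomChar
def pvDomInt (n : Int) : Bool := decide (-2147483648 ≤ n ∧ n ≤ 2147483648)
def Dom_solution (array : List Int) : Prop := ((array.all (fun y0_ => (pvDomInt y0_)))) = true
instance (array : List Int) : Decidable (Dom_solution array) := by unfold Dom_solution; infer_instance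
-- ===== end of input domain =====

-- B replaces A's two whole-array passes (forward ascents, backward descents with max) by a single forward pass over maximal strictly-descending segments, emitting each segment's values at once (alternative decomposition, same cost).


-- ===== PORT A =====
-- transliteration of A: bonus = [1]*n; forward pass assigning bonus[i-1]+1 on ascent;
-- backward pass range(n-2,-1,-1) taking max(bonus[i], bonus[i+1]+1) on descent.
-- all indices produced by the ranges are in range, so pyGetD/pySetD are exact here.
def solution (array : List Int) : List Int :=
  let bonus := List.replicate array.length (1 : Int)
  let bonus := (PySem.List.pyRange 1 (PySem.List.len array) 1).foldl
    (fun b i =>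
      if PySem.List.pyGetD array (i - 1) 0 < PySem.List.pyGetD array i 0 then
        PySem.List.pySetD b i (PySem.List.pyGetD b (i - 1) 0 + 1)
      else b) bonus
  let bonus := (PySem.List.pyRange (PySem.List.len bonus - 2) (-1) (-1)).foldl
    (fun b i =>
      if PySem.List.pyGetD array (i + 1) 0 < PySem.List.pyGetD array i 0 then
        PySem.List.pySetD b i (max (PySem.List.pyGetD b i 0) (PySem.List.pyGetD b (i + 1) 0 + 1))
      else b) bonus
  bonus

-- ===== PORT B =====
-- transliteration of B (Source B). The inner `while j+1 < n and array[j+1] < array[j]: j += 1; d = j-i+1`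
-- becomes the counting recursion descLen (exact: same comparisons, same count); all indices
-- accessed are in range, so List.getD is exact for Python's indexing here.
def descLen (a : List Int) (j : Nat) : Nat :=
  if h : j + 1 < a.length ∧ a.getD (j + 1) 0 < a.getD j 0 then
    descLen a (j + 1) + 1
  else 1
termination_by a.length - j
decreasing_by omega

lemma descLen_pos (a : List Int) (j : Nat) : 1 ≤ descLen a j := by
  unfold descLen; split <;> omega

-- the outer `while i < n` loop of Source B; `for t in range(1, d): res.append(d - t)` is the foldl
def segLoop (a : List Int) (i : Nat) (res : List Int) : List Int :=
  if h : i < a.length then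
    let d := descLen a i
    let inc : Int := if 0 < i ∧ a.getD (i - 1) 0 < a.getD i 0 then res.getLastD 0 + 1 else 1
    let res' := (PySem.List.pyRange 1 (d : Int) 1).foldl
      (fun r t => r ++ [(d : Int) - t]) (res ++ [max inc (d : Int)])
    segLoop a (i + d) res'
  else res
termination_by a.length - i
decreasing_by have := descLen_pos a i; omega

def solution_alt (array : List Int) : List Int := segLoop array 0 []

-- ===== PRECONDITION & SPEC =====
def Spec_solution (array : List Int) (out : List Int) : Prop := out = solution_alt array
instance (array : List Int) (out : List Int) : Decidable (Spec_solution array out) := by unfold Spec_solution; infer_instance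

-- ===== CLAIM (what is proved, stated in full; the proofs are below) =====
def Claim_equal_solution : Prop := ∀ (array : List Int), Dom_solution array → Spec_solution array (solution array)

-- ===== LEMMAS AND PROOFS =====

-- length of the strictly-ascending run of `a` ending at index i
def incI (a : List Int) : Nat → Int
  | 0 => 1
  | i + 1 => if a.getD i 0 < a.getD (i + 1) 0 then incI a i + 1 else 1

lemma one_le_incI (a : List Int) (i : Nat) : 1 ≤ incI a i := by
  induction i with
  | zero => simp [incI]
  | succ i ih => simp only [incI]; split <;> omega

-- value A's backward pass leaves at distance k from the right end
def dR (a : List Int) : Nat → Int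
  | 0 => incI a (a.length - 1)
  | k + 1 =>
    if a.getD (a.length - 2 - k + 1) 0 < a.getD (a.length - 2 - k) 0 then
      max (incI a (a.length - 2 - k)) (dR a k + 1)
    else incI a (a.length - 2 - k)

lemma getD_reverse (a : List Int) (k : Nat) (hk : k < a.length) :
    a.reverse.getD k 0 = a.getD (a.length - 1 - k) 0 := by
  rw [List.getD_eq_getElem _ 0 (by simpa using hk), List.getD_eq_getElem _ 0 (by omega),
    List.getElem_reverse]

lemma dR_eq_max (a : List Int) (k : Nat) (hk : k ≤ a.length - 1) (hn : 1 ≤ a.length) :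
    dR a k = max (incI a (a.length - 1 - k)) (incI a.reverse k) := by
  induction k with
  | zero =>
    show incI a (a.length - 1) = _
    have h1 : incI a.reverse 0 = 1 := rfl
    have := one_le_incI a (a.length - 1)
    simp only [Nat.sub_zero, h1]
    omega
  | succ k ih =>
    have hk' : k ≤ a.length - 1 := by omega
    have hkn : k + 1 ≤ a.length - 1 := hk
    have hi : a.length - 2 - k + 1 = a.length - 1 - k := by omega
    have hrev1 : a.reverse.getD k 0 = a.getD (a.length - 1 - k) 0 := getD_reverse a k (by omega)
    have hrev2 : a.reverse.getD (k + 1) 0 = a.getD (a.length - 2 - k) 0 := by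
      rw [getD_reverse a (k + 1) (by omega)]; congr 1; omega
    have hIr : incI a.reverse (k + 1)
        = if a.getD (a.length - 1 - k) 0 < a.getD (a.length - 2 - k) 0 then incI a.reverse k + 1 else 1 := by
      show (if a.reverse.getD k 0 < a.reverse.getD (k + 1) 0 then _ else _) = _
      rw [hrev1, hrev2]
    show (if a.getD (a.length - 2 - k + 1) 0 < a.getD (a.length - 2 - k) 0 then
        max (incI a (a.length - 2 - k)) (dR a k + 1) else incI a (a.length - 2 - k)) = _
    rw [hi, hIr, ih hk']
    have htarget : a.length - 1 - (k + 1) = a.length - 2 - k := by omega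
    rw [htarget]
    by_cases hc : a.getD (a.length - 1 - k) 0 < a.getD (a.length - 2 - k) 0
    · rw [if_pos hc, if_pos hc]
      have hinc1 : incI a (a.length - 1 - k) = 1 := by
        obtain ⟨j, hj⟩ : ∃ j, a.length - 1 - k = j + 1 := ⟨a.length - 2 - k, by omega⟩
        rw [hj]
        show (if a.getD j 0 < a.getD (j + 1) 0 then _ else _) = 1
        have e1 : j = a.length - 2 - k := by omega
        have e2 : j + 1 = a.length - 1 - k := by omega
        have hcond : ¬ a.getD j 0 < a.getD (j + 1) 0 := by
          rw [e1, hi]; exact not_lt.mpr (le_of_lt hc)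
        rw [if_neg hcond]
      rw [hinc1]
      have h1 := one_le_incI a.reverse k
      have h2 := one_le_incI a (a.length - 2 - k)
      omega
    · rw [if_neg hc, if_neg hc]
      have := one_le_incI a (a.length - 2 - k)
      omega

lemma getD_set (b : List Int) (m j : Nat) (v : Int) (hm : m < b.length) :
    (b.set m v).getD j 0 = if j = m then v else b.getD j 0 := by
  simp only [List.getD_eq_getElem?_getD, List.getElem?_set, if_pos hm]
  split
  · rename_i h; subst h; rw [Option.getD_some, if_pos rfl]
  · rename_i h; rw [if_neg (fun hh => h hh.symm)]

lemma getD_replicate1 (n j : Nat) (hj : j < n) : (List.replicate n (1:Int)).getD j 0 = 1 := by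
  rw [List.getD_eq_getElem _ _ (by simpa using hj), List.getElem_replicate]

lemma pass1_getD (a : List Int) (m : Nat) (hm : m ≤ a.length) :
    ((PySem.List.pyRange 1 (m : Int) 1).foldl
      (fun b i =>
        if PySem.List.pyGetD a (i - 1) 0 < PySem.List.pyGetD a i 0 then
          PySem.List.pySetD b i (PySem.List.pyGetD b (i - 1) 0 + 1)
        else b) (List.replicate a.length (1 : Int))).length = a.length ∧
    ∀ j < a.length,
      ((PySem.List.pyRange 1 (m : Int) 1).foldl
        (fun b i =>
          if PySem.List.pyGetD a (i - 1) 0 < PySem.List.pyGetD a i 0 then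
            PySem.List.pySetD b i (PySem.List.pyGetD b (i - 1) 0 + 1)
          else b) (List.replicate a.length (1 : Int))).getD j 0
      = if j < m then incI a j else 1 := by
  induction m with
  | zero =>
    rw [PySem.List.pyRange_one_eq_nil (by norm_num)]
    refine ⟨by simp, ?_⟩
    intro j hj
    simp only [List.foldl_nil]
    rw [if_neg (by omega), getD_replicate1 _ _ hj]
  | succ m ih =>
    rcases Nat.eq_zero_or_pos m with hm0 | hmpos
    · subst hm0
      rw [show ((0 + 1 : Nat) : Int) = 1 by norm_num, PySem.List.pyRange_one_eq_nil (by norm_num)]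
      constructor
      · simp
      · intro j hj
        simp only [List.foldl_nil]
        by_cases h0 : j < 1
        · have : j = 0 := by omega
          subst this
          rw [if_pos h0, getD_replicate1 _ _ hj]
          rfl
        · rw [if_neg h0, getD_replicate1 _ _ hj]
    · obtain ⟨hlen, hval⟩ := ih (by omega)
      rw [show ((m + 1 : Nat) : Int) = (m : Int) + 1 by push_cast; ring,
        PySem.List.pyRange_one_succ_right (by exact_mod_cast Nat.one_le_iff_ne_zero.mpr (by omega)),
        List.foldl_append, List.foldl_cons, List.foldl_nil]
      set r := (PySem.List.pyRange 1 (m : Int) 1).foldl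
        (fun b i =>
          if PySem.List.pyGetD a (i - 1) 0 < PySem.List.pyGetD a i 0 then
            PySem.List.pySetD b i (PySem.List.pyGetD b (i - 1) 0 + 1)
          else b) (List.replicate a.length (1 : Int)) with hr
      have hcast : ((m : Int) - 1) = ((m - 1 : Nat) : Int) := by omega
      have hga : PySem.List.pyGetD a ((m : Int) - 1) 0 = a.getD (m - 1) 0 := by
        rw [hcast, PySem.List.pyGetD_natCast]
      have hga2 : PySem.List.pyGetD a (m : Int) 0 = a.getD m 0 := by rw [PySem.List.pyGetD_natCast]
      have hgr : PySem.List.pyGetD r ((m : Int) - 1) 0 = r.getD (m - 1) 0 := by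
        rw [hcast, PySem.List.pyGetD_natCast]
      have hsetr : ∀ v : Int, PySem.List.pySetD r (m : Int) v = r.set m v := fun v =>
        PySem.List.pySetD_natCast r m v
      rw [hga, hga2, hgr]
      by_cases hc : a.getD (m - 1) 0 < a.getD m 0
      · rw [if_pos hc, hsetr]
        refine ⟨by rw [List.length_set, hlen], ?_⟩
        intro j hj
        rw [getD_set r m j _ (by omega)]
        by_cases hjm : j = m
        · subst hjm
          rw [if_pos rfl, if_pos (by omega), hval (j - 1) (by omega),
            if_pos (by omega)]
          obtain ⟨i, hi⟩ : ∃ i, j = i + 1 := ⟨j - 1, by omega⟩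
          subst hi
          simp only [Nat.add_sub_cancel]
          show _ = incI a (i + 1)
          have : incI a (i + 1) = if a.getD i 0 < a.getD (i + 1) 0 then incI a i + 1 else 1 := rfl
          rw [this, if_pos (by simpa [Nat.add_sub_cancel] using hc)]
        · rw [if_neg hjm, hval j hj]
          by_cases hjlt : j < m
          · rw [if_pos hjlt, if_pos (by omega)]
          · rw [if_neg hjlt, if_neg (by omega)]
      · rw [if_neg hc]
        refine ⟨hlen, ?_⟩
        intro j hj
        rw [hval j hj]
        by_cases hjm : j = m
        · subst hjm
          rw [if_neg (by omega), if_pos (by omega)]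
          obtain ⟨i, hi⟩ : ∃ i, j = i + 1 := ⟨j - 1, by omega⟩
          subst hi
          show (1:Int) = incI a (i + 1)
          have : incI a (i + 1) = if a.getD i 0 < a.getD (i + 1) 0 then incI a i + 1 else 1 := rfl
          rw [this, if_neg (by simpa [Nat.add_sub_cancel] using hc)]
        · by_cases hjlt : j < m
          · rw [if_pos hjlt, if_pos (by omega)]
          · rw [if_neg hjlt, if_neg (by omega)]

lemma pass2_getD (a : List Int) (hn : 2 ≤ a.length) :
    ∀ (i : Nat), i ≤ a.length - 2 →
    ∀ (b : List Int), b.length = a.length →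
    (∀ j < a.length, i < j → b.getD j 0 = dR a (a.length - 1 - j)) →
    (∀ j ≤ i, b.getD j 0 = incI a j) →
    ((PySem.List.pyRange (i : Int) (-1) (-1)).foldl
      (fun b i =>
        if PySem.List.pyGetD a (i + 1) 0 < PySem.List.pyGetD a i 0 then
          PySem.List.pySetD b i (max (PySem.List.pyGetD b i 0) (PySem.List.pyGetD b (i + 1) 0 + 1))
        else b) b).length = a.length ∧
    ∀ j < a.length,
      ((PySem.List.pyRange (i : Int) (-1) (-1)).foldl
        (fun b i =>
          if PySem.List.pyGetD a (i + 1) 0 < PySem.List.pyGetD a i 0 then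
            PySem.List.pySetD b i (max (PySem.List.pyGetD b i 0) (PySem.List.pyGetD b (i + 1) 0 + 1))
          else b) b).getD j 0 = dR a (a.length - 1 - j) := by
  intro i
  induction i with
  | zero =>
    intro hi b hb hset hinc
    rw [PySem.List.pyRange_neg_one_cons (by norm_num), PySem.List.pyRange_neg_one_eq_nil (by norm_num),
      List.foldl_cons, List.foldl_nil]
    have e01 : ((0:Nat):Int) + 1 = ((1:Nat):Int) := by norm_num
    have hga1 : PySem.List.pyGetD a (((0:Nat):Int) + 1) 0 = a.getD 1 0 := by
      rw [e01, PySem.List.pyGetD_natCast]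
    have hga0 : PySem.List.pyGetD a ((0:Nat):Int) 0 = a.getD 0 0 := PySem.List.pyGetD_natCast _ _ _
    have hgb1 : PySem.List.pyGetD b (((0:Nat):Int) + 1) 0 = b.getD 1 0 := by
      rw [e01, PySem.List.pyGetD_natCast]
    have hgb0 : PySem.List.pyGetD b ((0:Nat):Int) 0 = b.getD 0 0 := PySem.List.pyGetD_natCast _ _ _
    have hset0 : ∀ v : Int, PySem.List.pySetD b ((0:Nat):Int) v = b.set 0 v := fun v =>
      PySem.List.pySetD_natCast b 0 v
    have hd : dR a (a.length - 1 - 0) = (if a.getD 1 0 < a.getD 0 0 then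
        max (incI a 0) (dR a (a.length - 2) + 1) else incI a 0) := by
      have hk : a.length - 1 - 0 = (a.length - 2) + 1 := by omega
      rw [hk]
      show (if a.getD (a.length - 2 - (a.length - 2) + 1) 0 < a.getD (a.length - 2 - (a.length - 2)) 0 then
        max (incI a (a.length - 2 - (a.length - 2))) (dR a (a.length - 2) + 1)
        else incI a (a.length - 2 - (a.length - 2))) = _
      have e1 : a.length - 2 - (a.length - 2) = 0 := by omega
      rw [e1]
    have hb1 : b.getD 1 0 = dR a (a.length - 2) := by
      rw [hset 1 (by omega) (by omega)]; congr 1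
    have hb0 : b.getD 0 0 = incI a 0 := hinc 0 (le_refl 0)
    rw [hga1, hga0, hgb1, hgb0, hb1, hb0]
    by_cases hc : a.getD 1 0 < a.getD 0 0
    · rw [if_pos hc, hset0]
      refine ⟨by rw [List.length_set, hb], ?_⟩
      intro j hj
      rw [getD_set b 0 j _ (by omega)]
      by_cases hj0 : j = 0
      · subst hj0; rw [if_pos rfl, hd, if_pos hc]
      · rw [if_neg hj0, hset j hj (by omega)]
    · rw [if_neg hc]
      refine ⟨hb, ?_⟩
      intro j hj
      by_cases hj0 : j = 0
      · subst hj0; rw [hb0, hd, if_neg hc]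
      · exact hset j hj (by omega)
  | succ i ih =>
    intro hi b hb hset hinc
    rw [PySem.List.pyRange_neg_one_cons (by omega), List.foldl_cons]
    have hcast : ((i + 1 : Nat) : Int) - 1 = ((i : Nat) : Int) := by push_cast; ring
    have hga1 : PySem.List.pyGetD a (((i+1 : Nat) : Int) + 1) 0 = a.getD (i + 2) 0 := by
      rw [show (((i+1 : Nat) : Int) + 1) = ((i + 2 : Nat) : Int) by push_cast; ring, PySem.List.pyGetD_natCast]
    have hga0 : PySem.List.pyGetD a ((i+1 : Nat) : Int) 0 = a.getD (i + 1) 0 := PySem.List.pyGetD_natCast _ _ _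
    have hgb1 : PySem.List.pyGetD b (((i+1 : Nat) : Int) + 1) 0 = b.getD (i + 2) 0 := by
      rw [show (((i+1 : Nat) : Int) + 1) = ((i + 2 : Nat) : Int) by push_cast; ring, PySem.List.pyGetD_natCast]
    have hgb0 : PySem.List.pyGetD b ((i+1 : Nat) : Int) 0 = b.getD (i + 1) 0 := PySem.List.pyGetD_natCast _ _ _
    have hd : dR a (a.length - 1 - (i + 1)) = (if a.getD (i + 2) 0 < a.getD (i + 1) 0 then
        max (incI a (i + 1)) (dR a (a.length - 3 - i) + 1) else incI a (i + 1)) := by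
      have hk : a.length - 1 - (i + 1) = (a.length - 3 - i) + 1 := by omega
      rw [hk]
      show (if a.getD (a.length - 2 - (a.length - 3 - i) + 1) 0 < a.getD (a.length - 2 - (a.length - 3 - i)) 0 then
        max (incI a (a.length - 2 - (a.length - 3 - i))) (dR a (a.length - 3 - i) + 1)
        else incI a (a.length - 2 - (a.length - 3 - i))) = _
      have e1 : a.length - 2 - (a.length - 3 - i) = i + 1 := by omega
      rw [e1]
    have hb2 : b.getD (i + 2) 0 = dR a (a.length - 3 - i) := by
      rw [hset (i + 2) (by omega) (by omega)]; congr 1; omega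
    have hb1 : b.getD (i + 1) 0 = incI a (i + 1) := hinc (i + 1) (le_refl _)
    have hsetb : ∀ v : Int, PySem.List.pySetD b ((i+1 : Nat) : Int) v = b.set (i+1) v := fun v =>
      PySem.List.pySetD_natCast b (i+1) v
    rw [hcast, hga1, hga0, hgb1, hgb0, hb2, hb1]
    by_cases hc : a.getD (i + 2) 0 < a.getD (i + 1) 0
    · rw [if_pos hc, hsetb]
      refine ih (by omega) _ (by rw [List.length_set, hb]) ?_ ?_
      · intro j hj hij
        rw [getD_set b (i+1) j _ (by omega)]
        by_cases hji : j = i + 1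
        · subst hji; rw [if_pos rfl, hd, if_pos hc]
        · rw [if_neg hji, hset j hj (by omega)]
      · intro j hji
        rw [getD_set b (i+1) j _ (by omega), if_neg (by omega), hinc j (by omega)]
    · rw [if_neg hc]
      refine ih (by omega) _ hb ?_ ?_
      · intro j hj hij
        by_cases hji : j = i + 1
        · subst hji; rw [hb1, hd, if_neg hc]
        · exact hset j hj (by omega)
      · exact fun j hji => hinc j (by omega)

lemma solution_len_getD (a : List Int) (hn : 2 ≤ a.length) :
    (solution a).length = a.length ∧
    ∀ j < a.length, (solution a).getD j 0 = dR a (a.length - 1 - j) := by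
  obtain ⟨hlen1, hval1⟩ := pass1_getD a a.length (le_refl _)
  simp only [solution, PySem.List.len_eq]
  rw [hlen1, show ((a.length : Int) - 2) = ((a.length - 2 : Nat) : Int) by omega]
  refine pass2_getD a hn (a.length - 2) (le_refl _) _ hlen1 ?_ ?_
  · intro j hj hgt
    have hj1 : j = a.length - 1 := by omega
    subst hj1
    rw [hval1 _ hj, if_pos (by omega), show a.length - 1 - (a.length - 1) = 0 by omega]
    rfl
  · intro j hj
    rw [hval1 j (by omega), if_pos (by omega)]

-- ===== B-side characterization =====

-- the per-index intended value: max of ascending-run length ending at j and descending-run length starting at j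
def valB (a : List Int) (j : Nat) : Int := max (incI a j) ((descLen a j : Int))

lemma descLen_two (a : List Int) (j : Nat) (h : 2 ≤ descLen a j) :
    j + 1 < a.length ∧ a.getD (j + 1) 0 < a.getD j 0 ∧ descLen a j = descLen a (j + 1) + 1 := by
  by_cases hc : j + 1 < a.length ∧ a.getD (j + 1) 0 < a.getD j 0
  · exact ⟨hc.1, hc.2, by rw [descLen]; rw [dif_pos hc]⟩
  · exfalso; rw [descLen, dif_neg hc] at h; omega

lemma descLen_one (a : List Int) (j : Nat)
    (hc : ¬ (j + 1 < a.length ∧ a.getD (j + 1) 0 < a.getD j 0)) : descLen a j = 1 := by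
  rw [descLen, dif_neg hc]

lemma descLen_le_len (a : List Int) (j : Nat) (h : j < a.length) :
    j + descLen a j ≤ a.length := by
  by_cases h2 : 2 ≤ descLen a j
  · obtain ⟨h1, _, h3⟩ := descLen_two a j h2
    have := descLen_le_len a (j + 1) h1
    omega
  · have := descLen_pos a j
    omega
termination_by a.length - j
decreasing_by
  have h1 : j + 1 < a.length := (descLen_two a j h2).1
  omega

lemma descLen_shift (a : List Int) (i : Nat) :
    ∀ t, t < descLen a i → descLen a (i + t) = descLen a i - t := by
  intro t
  induction t generalizing i with
  | zero => intro _; simp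
  | succ t ih =>
    intro ht
    obtain ⟨h1, h2, h3⟩ := descLen_two a i (by omega)
    have : i + (t + 1) = (i + 1) + t := by omega
    rw [this, ih (i + 1) (by omega), h3]
    omega

lemma desc_step (a : List Int) (i : Nat) :
    ∀ t, t + 1 < descLen a i → a.getD (i + t + 1) 0 < a.getD (i + t) 0 := by
  intro t ht
  have h := descLen_shift a i t (by omega)
  have h2 : 2 ≤ descLen a (i + t) := by omega
  exact (descLen_two a (i + t) h2).2.1

lemma incI_desc (a : List Int) (i t : Nat) (ht : 0 < t) (htd : t < descLen a i) :
    incI a (i + t) = 1 := by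
  obtain ⟨s, hs⟩ : ∃ s, t = s + 1 := ⟨t - 1, by omega⟩
  subst hs
  have hdesc := desc_step a i s (by omega)
  show incI a ((i + s) + 1) = 1
  rw [incI, if_neg (not_lt.mpr (le_of_lt hdesc))]

-- revRun: the descending run starting at j is the ascending run of the reverse ending at n-1-j
lemma rev_desc (a : List Int) : ∀ k, k < a.length →
    incI a.reverse k = (descLen a (a.length - 1 - k) : Int) := by
  intro k
  induction k with
  | zero =>
    intro hk
    have : descLen a (a.length - 1) = 1 :=
      descLen_one a (a.length - 1) (by intro h; omega)
    simp only [Nat.sub_zero]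
    rw [this]; rfl
  | succ k ih =>
    intro hk
    have hrev1 : a.reverse.getD k 0 = a.getD (a.length - 1 - k) 0 := getD_reverse a k (by omega)
    have hrev2 : a.reverse.getD (k + 1) 0 = a.getD (a.length - 2 - k) 0 := by
      rw [getD_reverse a (k + 1) (by omega)]; congr 1; omega
    have hj1 : a.length - 2 - k + 1 = a.length - 1 - k := by omega
    have hIr : incI a.reverse (k + 1)
        = if a.getD (a.length - 1 - k) 0 < a.getD (a.length - 2 - k) 0 then incI a.reverse k + 1 else 1 := by
      show (if a.reverse.getD k 0 < a.reverse.getD (k + 1) 0 then _ else _) = _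
      rw [hrev1, hrev2]
    rw [hIr, show a.length - 1 - (k + 1) = a.length - 2 - k by omega]
    by_cases hc : a.getD (a.length - 1 - k) 0 < a.getD (a.length - 2 - k) 0
    · rw [if_pos hc, ih (by omega)]
      have : descLen a (a.length - 2 - k) = descLen a (a.length - 1 - k) + 1 := by
        rw [descLen, dif_pos (by rw [hj1]; exact ⟨by omega, hc⟩)]
        rw [hj1]
      rw [this]; push_cast; ring
    · rw [if_neg hc]
      have : descLen a (a.length - 2 - k) = 1 :=
        descLen_one _ _ (by rw [hj1]; intro h; exact hc h.2)
      rw [this]; rfl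

-- the back-fill foldl appends d-1, ..., 1
lemma foldl_append_map (l : List Int) (f : Int → Int) (r0 : List Int) :
    l.foldl (fun r t => r ++ [f t]) r0 = r0 ++ l.map f := by
  induction l generalizing r0 with
  | nil => simp
  | cons x xs ih => simp [ih]

lemma segLoop_eq (a : List Int) : ∀ m i res, a.length - i ≤ m → i ≤ a.length →
    res = (List.range i).map (valB a) →
    segLoop a i res = (List.range a.length).map (valB a) := by
  intro m
  induction m with
  | zero =>
    intro i res hm hle hres
    have : i = a.length := by omega
    subst this
    rw [segLoop, dif_neg (lt_irrefl _), hres]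
  | succ m ih =>
    intro i res hm hle hres
    by_cases h : i < a.length
    · rw [segLoop, dif_pos h]
      show segLoop a (i + descLen a i)
          ((PySem.List.pyRange 1 ((descLen a i : Int)) 1).foldl
            (fun r t => r ++ [(descLen a i : Int) - t])
            (res ++ [max (if 0 < i ∧ a.getD (i - 1) 0 < a.getD i 0 then res.getLastD 0 + 1 else 1)
              (descLen a i : Int)]))
        = List.map (valB a) (List.range a.length)
      set d := descLen a i with hd
      have hd1 : 1 ≤ d := descLen_pos a i
      have hdle : i + d ≤ a.length := descLen_le_len a i h
      -- the computed inc equals the relevant part of valB a i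
      have hinc : (if 0 < i ∧ a.getD (i - 1) 0 < a.getD i 0 then res.getLastD 0 + 1 else 1)
          = incI a i := by
        by_cases hc : 0 < i ∧ a.getD (i - 1) 0 < a.getD i 0
        · rw [if_pos hc]
          obtain ⟨i0, hi0⟩ : ∃ i0, i = i0 + 1 := ⟨i - 1, by omega⟩
          subst hi0
          have hlast : res.getLastD 0 = valB a i0 := by
            rw [hres, List.range_succ, List.map_append]
            simp
          have hcond : a.getD i0 0 < a.getD (i0 + 1) 0 := by
            simpa using hc.2
          have hdesc1 : descLen a i0 = 1 :=
            descLen_one a i0 (by rintro ⟨_, hlt⟩; exact absurd hcond (not_lt.mpr (le_of_lt hlt)))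
          have hval : valB a i0 = incI a i0 := by
            rw [valB, hdesc1]
            have := one_le_incI a i0
            simp; omega
          rw [hlast, hval]
          show incI a i0 + 1 = incI a (i0 + 1)
          rw [incI, if_pos hcond]
        · rw [if_neg hc]
          rcases Nat.eq_zero_or_pos i with h0 | hpos
          · subst h0; rfl
          · obtain ⟨i0, hi0⟩ : ∃ i0, i = i0 + 1 := ⟨i - 1, by omega⟩
            subst hi0
            have hcond : ¬ a.getD i0 0 < a.getD (i0 + 1) 0 := by
              intro hlt
              exact hc ⟨by omega, by simpa using hlt⟩
            show (1:Int) = incI a (i0 + 1)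
            rw [incI, if_neg hcond]
      -- rewrite the back-fill foldl
      rw [foldl_append_map]
      apply ih (i + d) _ (by omega) (by omega)
      -- res ++ [max inc d] ++ map = range (i+d) map valB
      rw [show i + d = i + (1 + (d - 1)) by omega, List.range_add, List.map_append, hres,
        List.append_assoc]
      congr 1
      -- [max inc d] ++ map over pyRange = map valB over (range (1+(d-1))).map (i+·)
      rw [List.map_map]
      apply List.ext_getElem
      · simp [PySem.List.length_pyRange_one]
        omega
      · intro k h1 h2
        rw [hres] at hinc
        simp only [List.length_range, List.length_map] at h2
        simp only [List.singleton_append, List.length_cons, List.length_map, PySem.List.length_pyRange_one] at h1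
        rcases Nat.eq_zero_or_pos k with hk0 | hkpos
        · subst hk0
          simp only [List.singleton_append, List.getElem_cons_zero, List.getElem_map,
            List.getElem_range, Function.comp_apply]
          rw [hinc]
          show max (incI a i) (d : Int) = valB a (i + 0)
          simp [valB, ← hd]
        · obtain ⟨s, hs⟩ : ∃ s, k = s + 1 := ⟨k - 1, by omega⟩
          subst hs
          simp only [List.singleton_append, List.getElem_cons_succ, List.getElem_map,
            List.getElem_range, Function.comp_apply]
          have hsd : s < ((d:Int) - 1).toNat := by omega
          rw [PySem.List.getElem_pyRange_one]
          show (d:Int) - (1 + s) = valB a (i + (s + 1))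
          have hval1 : incI a (i + (s + 1)) = 1 := incI_desc a i (s + 1) (by omega) (by omega)
          have hshift : descLen a (i + (s + 1)) = d - (s + 1) := descLen_shift a i (s + 1) (by omega)
          rw [valB, hval1, hshift]
          have hge : 1 ≤ d - (s + 1) := by omega
          rw [max_eq_right (by exact_mod_cast by omega : (1:Int) ≤ ((d - (s+1) : Nat) : Int))]
          omega
    · have : i = a.length := by omega
      subst this
      rw [segLoop, dif_neg (lt_irrefl _), hres]

lemma solution_alt_eq (a : List Int) :
    solution_alt a = (List.range a.length).map (valB a) := by
  exact segLoop_eq a a.length 0 [] (by omega) (by omega) (by simp)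

lemma solution_eq (a : List Int) : solution a = solution_alt a := by
  rw [solution_alt_eq]
  by_cases hn : 2 ≤ a.length
  · obtain ⟨hl, hv⟩ := solution_len_getD a hn
    apply List.ext_getElem (by simp [hl])
    intro j h1 h2
    have hj : j < a.length := by rwa [hl] at h1
    rw [← List.getD_eq_getElem _ 0 h1, hv j hj]
    simp only [List.getElem_map, List.getElem_range]
    rw [dR_eq_max a (a.length - 1 - j) (by omega) (by omega),
      show a.length - 1 - (a.length - 1 - j) = j by omega, valB,
      rev_desc a (a.length - 1 - j) (by omega),
      show a.length - 1 - (a.length - 1 - j) = j by omega]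
  · match a, hn with
    | [], _ => rfl
    | [x], _ =>
      show solution [x] = [valB [x] 0]
      have h1 : valB [x] 0 = 1 := by
        rw [valB, descLen_one [x] 0 (by intro h; simp at h)]
        rfl
      rw [h1]
      rfl
    | (x :: y :: t), hn => exact absurd (by simp) hn

-- ===== VERDICT (by name: the statement is the Claim_ definition above) =====
theorem solution_spec : Claim_equal_solution := by
  intro a _
  show _ = _
  exact solution_eq a
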